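-- pv_equiv track=rewrite | github.com/silverstone-git/matops | matops.py | negatefn
-- ===== SOURCE A (Python) =====
-- def negatefn(listofcfs):
--     '''
--     List of numbers defining the coefficients of a polynomial as argument
--     Equivalent to the transformation x --> -x, to check for odd or even function
--     '''
--     if (len(listofcfs) % 2) == 0:
--         for index in range(len(listofcfs)):
--             listofcfs[index] *= (-1)**(index+1)
--     else:
--         for index in range(len(listofcfs)):
--             listofcfs[index] *= (-1)**(index)
--     return listofcfs
-- ===== SOURCE B (Python) =====
-- def negatefn(listofcfs):
--     # Same return value as A (both mutate the argument in place).
--     # Insight: in BOTH of A's branches the negated coefficients are exactly the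
--     # 2nd-from-last, 4th-from-last, ... elements, so a single back-to-front pass
--     # with an alternating flag needs no length-parity branch and no (-1)** powers.
--     out = []
--     negate = False  # the last element is never negated
--     for c in reversed(listofcfs):
--         out.append(c * -1 if negate else c)
--         negate = not negate
--     out.reverse()
--     listofcfs[:] = out
--     return listofcfs
-- ===== Notes on version B (the rewrite author's own statement) =====
-- stated objective: simpler
-- what changed: Replaced A's two length-parity branches that multiply every element by a computed power (-1)**k with a single back-to-front pass using an alternating boolean flag (the negated coefficients are exactly every second element counted from the end), eliminating both the branch and the per-index exponentiation.
import Mathlib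
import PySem

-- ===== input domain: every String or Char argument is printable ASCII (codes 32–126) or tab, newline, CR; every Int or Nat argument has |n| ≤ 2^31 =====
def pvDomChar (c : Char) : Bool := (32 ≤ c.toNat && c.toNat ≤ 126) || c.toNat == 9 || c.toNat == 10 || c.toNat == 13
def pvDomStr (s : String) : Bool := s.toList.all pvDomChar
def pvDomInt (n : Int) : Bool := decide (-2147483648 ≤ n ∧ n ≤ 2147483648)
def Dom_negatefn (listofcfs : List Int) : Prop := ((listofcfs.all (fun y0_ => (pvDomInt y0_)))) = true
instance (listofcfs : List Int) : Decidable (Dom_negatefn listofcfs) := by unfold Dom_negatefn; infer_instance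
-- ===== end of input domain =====

-- B replaces A's two length-parity branches with a computed sign (-1)**k by one
-- back-to-front pass with an alternating flag (simpler; equal return values —
-- both Pythons mutate the argument in place, so side effects agree too).

-- ===== PORT A =====
-- A mutates listofcfs[index] in place; the list state is the fold accumulator.
def negatefn (listofcfs : List Int) : List Int :=
  if listofcfs.length % 2 == 0 then
    (List.range listofcfs.length).foldl
      (fun acc index => acc.set index (acc.getD index 0 * (-1) ^ (index + 1))) listofcfs
  else
    (List.range listofcfs.length).foldl
      (fun acc index => acc.set index (acc.getD index 0 * (-1) ^ index)) listofcfs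

-- ===== PORT B =====
-- out.append over reversed(listofcfs) with the toggling flag, then out.reverse().
def negatefn_alt (listofcfs : List Int) : List Int :=
  (listofcfs.reverse.foldl
      (fun (st : List Int × Bool) c => (st.1 ++ [if st.2 then c * -1 else c], !st.2))
      ([], false)).1.reverse

-- ===== PRECONDITION & SPEC =====
def Spec_negatefn (listofcfs : List Int) (out : List Int) : Prop := out = negatefn_alt listofcfs
instance (listofcfs : List Int) (out : List Int) : Decidable (Spec_negatefn listofcfs out) := by unfold Spec_negatefn; infer_instance

-- ===== CLAIM (what is proved, stated in full; the proofs are below) =====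
def Claim_equal_negatefn : Prop := ∀ (listofcfs : List Int), Dom_negatefn listofcfs → Spec_negatefn listofcfs (negatefn listofcfs)

-- ===== LEMMAS AND PROOFS =====

-- the common characterisation: element i is negated iff (length + i) is even
def negSpec (l : List Int) : List Int :=
  l.mapIdx (fun i x => if (l.length + i) % 2 == 0 then x * -1 else x)

theorem mapIdx_id_int (l : List Int) : List.mapIdx (fun _ x => x) l = l := by
  induction l with
  | nil => rfl
  | cons a t ih => simp [List.mapIdx_cons, ih]

-- A-side: the index loop computes mapIdx with the per-index sign
theorem foldl_set_eq_mapIdx (f : Nat → Int) (l : List Int) (k : Nat) (hk : k ≤ l.length) :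
    (List.range k).foldl (fun acc i => acc.set i (acc.getD i 0 * f i)) l
      = l.mapIdx (fun i x => if i < k then x * f i else x) := by
  induction k with
  | zero => simp [mapIdx_id_int]
  | succ k ih =>
      rw [List.range_succ, List.foldl_append, ih (Nat.le_of_succ_le hk)]
      apply List.ext_getElem
      · simp
      · intro j hj1 hj2
        simp only [List.foldl_cons, List.foldl_nil] at hj1 ⊢
        have hjl : j < l.length := by simpa using hj2
        have hkl : k < l.length := hk
        have hget : (l.mapIdx fun i x => if i < k then x * f i else x).getD k 0
            = l[k] := by
          rw [List.getD_eq_getElem _ _ (by simpa using hkl), List.getElem_mapIdx]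
          simp
        rw [List.getElem_set]
        by_cases hkj : k = j
        · subst hkj
          rw [if_pos rfl, hget, List.getElem_mapIdx, if_pos (by omega)]
        · rw [if_neg hkj, List.getElem_mapIdx]
          by_cases h1 : j < k
          · rw [if_pos h1, List.getElem_mapIdx, if_pos (by omega)]
          · rw [if_neg h1, List.getElem_mapIdx, if_neg (by omega)]

theorem negatefn_eq_spec (l : List Int) : negatefn l = negSpec l := by
  unfold negatefn negSpec
  by_cases hpar : l.length % 2 = 0
  · rw [if_pos (by simpa using hpar),
      foldl_set_eq_mapIdx (fun i => (-1) ^ (i + 1)) l l.length le_rfl]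
    apply List.ext_getElem
    · simp
    · intro j hj1 hj2
      rw [List.getElem_mapIdx, List.getElem_mapIdx]
      have hjl : j < l.length := by simpa using hj1
      simp only [hjl, if_true]
      rcases Nat.even_or_odd j with he | ho
      · have h1 : Odd (j + 1) := Even.add_one he
        have h2 : (l.length + j) % 2 = 0 := by
          obtain ⟨m, hm⟩ := he; omega
        simp [Odd.neg_one_pow h1, h2]
      · have h1 : Even (j + 1) := Odd.add_one ho
        have h2 : ¬ (l.length + j) % 2 = 0 := by
          obtain ⟨m, hm⟩ := ho; omega
        simp [Even.neg_one_pow h1, h2]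
  · rw [if_neg (by simpa using hpar),
      foldl_set_eq_mapIdx (fun i => (-1) ^ i) l l.length le_rfl]
    apply List.ext_getElem
    · simp
    · intro j hj1 hj2
      rw [List.getElem_mapIdx, List.getElem_mapIdx]
      have hjl : j < l.length := by simpa using hj1
      simp only [hjl, if_true]
      rcases Nat.even_or_odd j with he | ho
      · have h2 : ¬ (l.length + j) % 2 = 0 := by
          obtain ⟨m, hm⟩ := he; omega
        simp [Even.neg_one_pow he, h2]
      · have h2 : (l.length + j) % 2 = 0 := by
          obtain ⟨m, hm⟩ := ho; omega
        simp [Odd.neg_one_pow ho, h2]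

-- B-side: the flag fold is a mapIdx on the reversed list
theorem foldl_flag_eq (ys : List Int) (acc : List Int) (b : Bool) :
    (ys.foldl (fun (st : List Int × Bool) c =>
        (st.1 ++ [if st.2 then c * -1 else c], !st.2)) (acc, b)).1
      = acc ++ ys.mapIdx (fun i c => if (b != decide (i % 2 = 1)) then c * -1 else c) := by
  induction ys generalizing acc b with
  | nil => simp
  | cons c ys ih =>
      simp only [List.foldl_cons, List.mapIdx_cons]
      rw [ih]
      have harg : (ys.mapIdx fun i c => if ((!b) != decide (i % 2 = 1)) then c * -1 else c)
          = ys.mapIdx fun i c => if (b != decide ((i + 1) % 2 = 1)) then c * -1 else c := by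
        apply List.ext_getElem
        · simp
        · intro j hj1 hj2
          rw [List.getElem_mapIdx, List.getElem_mapIdx]
          have hpar : decide ((j + 1) % 2 = 1) = !decide (j % 2 = 1) := by
            rcases Nat.mod_two_eq_zero_or_one j with h | h <;>
              simp [Nat.add_mod, h]
          rw [hpar]
          cases b <;> cases hd : decide (j % 2 = 1) <;> simp
      rw [harg]
      have h0 : (b != decide (0 % 2 = 1)) = b := by cases b <;> simp
      rw [h0]
      simp

theorem negatefn_alt_eq_spec (l : List Int) : negatefn_alt l = negSpec l := by
  unfold negatefn_alt negSpec
  rw [foldl_flag_eq]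
  simp only [List.nil_append]
  apply List.ext_getElem
  · simp
  · intro j hj1 hj2
    have hjl : j < l.length := by simpa using hj2
    rw [List.getElem_reverse, List.getElem_mapIdx]
    simp only [List.length_mapIdx, List.length_reverse]
    rw [List.getElem_mapIdx, List.getElem_reverse]
    have hidx : l.length - 1 - (l.length - 1 - j) = j := by omega
    simp only [hidx]
    have hcond : (false != decide ((l.length - 1 - j) % 2 = 1))
        = ((l.length + j) % 2 == 0) := by
      rcases Nat.mod_two_eq_zero_or_one (l.length + j) with h | h <;>
        · have : (l.length - 1 - j) % 2 = if (l.length + j) % 2 = 0 then 1 % 2 else 0 := by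
            split <;> omega
          simp [h] at this ⊢
          simp [this]
    rw [hcond]

-- ===== VERDICT (by name: the statement is the Claim_ definition above) =====
theorem negatefn_spec : Claim_equal_negatefn := by
  intro l _
  unfold Spec_negatefn
  rw [negatefn_eq_spec, negatefn_alt_eq_spec]
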